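-- pv_equiv track=rewrite | github.com/gwc0207/CBOND_ON | cbond_on/factors/defs/_intraday_utils.py | _normalize_ohlc_windows_plan
-- ===== SOURCE A (Python) =====
-- def _normalize_ohlc_windows_plan(params: dict) -> list[int]:
--     raw = params.get("__ohlc_windows_plan__")
--     if not isinstance(raw, (list, tuple, set)):
--         return []
--     out: list[int] = []
--     seen: set[int] = set()
--     for item in raw:
--         try:
--             w = int(item)
--         except Exception:
--             continue
--         if w <= 0 or w in seen:
--             continue
--         seen.add(w)
--         out.append(w)
--     return sorted(out)
-- ===== SOURCE B (Python) =====
-- def _normalize_ohlc_windows_plan(params: dict) -> list[int]: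
--     raw = params.get("__ohlc_windows_plan__")
--     if not isinstance(raw, (list, tuple, set)):
--         return []
--     vals = []
--     for item in raw:
--         try:
--             w = int(item)
--         except Exception:
--             continue
--         if w > 0:
--             vals.append(w)
--     vals.sort()
--     res = []
--     for v in vals:
--         if not res or v != res[-1]:
--             res.append(v)
--     return res
-- ===== Notes on version B (the rewrite author's own statement) =====
-- stated objective: alternative
-- what changed: B drops the 'seen' set entirely: it collects all positive conversions with duplicates, sorts, and deduplicates by adjacency in the sorted order (recursively), instead of A's first-occurrence dedup via a membership set before sorting.
import Mathlib
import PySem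

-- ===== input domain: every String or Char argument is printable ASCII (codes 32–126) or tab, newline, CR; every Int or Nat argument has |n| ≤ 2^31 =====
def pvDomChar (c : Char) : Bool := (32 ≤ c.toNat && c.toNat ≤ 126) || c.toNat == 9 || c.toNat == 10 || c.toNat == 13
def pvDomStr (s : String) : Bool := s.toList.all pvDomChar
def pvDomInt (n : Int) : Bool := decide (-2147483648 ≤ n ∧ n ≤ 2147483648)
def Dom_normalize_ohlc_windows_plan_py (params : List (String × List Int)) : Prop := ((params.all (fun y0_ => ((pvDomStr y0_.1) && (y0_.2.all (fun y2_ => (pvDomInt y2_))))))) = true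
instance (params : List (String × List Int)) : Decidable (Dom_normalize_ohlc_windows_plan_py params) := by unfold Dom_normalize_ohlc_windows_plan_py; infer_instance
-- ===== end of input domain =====

-- B drops A's 'seen' membership set: it collects the positive values with duplicates,
-- sorts, and then deduplicates adjacent equal elements of the sorted list in one pass.

-- ===== PORT A =====
-- Under the type convention the dict value is a List Int, so the isinstance guard only
-- rules out a missing key (raw = None), and int(item) is the identity and never raises.
def normalize_ohlc_windows_plan_py (params : List (String × List Int)) : List Int :=
  match PySem.Dict.get? (PySem.Dict.mk params) "__ohlc_windows_plan__" with
  | none => []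
  | some raw =>
    let st := raw.foldl (fun (st : List Int × PySem.Set Int) item =>
      if item ≤ 0 || PySem.Set.contains st.2 item then st
      else (st.1 ++ [item], PySem.Set.add st.2 item)) ([], PySem.Set.empty)
    PySem.List.sorted st.1 (fun x => x) false

-- ===== PORT B =====
-- 'if not res or v != res[-1]' ports as 'res.isEmpty || pyGet? res (-1) ≠ some v'
-- (pyGet? res (-1) is res[-1]; on the empty list it is none, matching the short-circuit).
def normalize_ohlc_windows_plan_py_alt (params : List (String × List Int)) : List Int :=
  match PySem.Dict.get? (PySem.Dict.mk params) "__ohlc_windows_plan__" with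
  | none => []
  | some raw =>
    let vals := raw.foldl (fun acc item => if 0 < item then acc ++ [item] else acc) []
    let s := PySem.List.sorted vals (fun x => x) false
    s.foldl (fun res v =>
      if res.isEmpty || PySem.List.pyGet? res (-1) ≠ some v then res ++ [v] else res) []

-- ===== PRECONDITION & SPEC =====
def Spec_normalize_ohlc_windows_plan_py (params : List (String × List Int)) (out : List Int) : Prop := out = normalize_ohlc_windows_plan_py_alt params
instance (params : List (String × List Int)) (out : List Int) : Decidable (Spec_normalize_ohlc_windows_plan_py params out) := by unfold Spec_normalize_ohlc_windows_plan_py; infer_instance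

-- ===== CLAIM (what is proved, stated in full; the proofs are below) =====
def Claim_equal_normalize_ohlc_windows_plan_py : Prop := ∀ (params : List (String × List Int)), Dom_normalize_ohlc_windows_plan_py params → Spec_normalize_ohlc_windows_plan_py params (normalize_ohlc_windows_plan_py params)

-- ===== LEMMAS AND PROOFS =====

-- In a strictly increasing list the last element is maximal.
lemma le_of_getLast?_pairwise_lt : ∀ (l : List Int), l.Pairwise (· < ·) →
    ∀ a, l.getLast? = some a → ∀ e ∈ l, e = a ∨ e < a := by
  intro l
  induction l with
  | nil => intro _ a ha; simp at ha
  | cons x t ih =>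
    intro hp a ha e he
    cases t with
    | nil =>
      simp only [List.getLast?_singleton, Option.some_inj] at ha
      simp only [List.mem_singleton] at he
      exact Or.inl (he.trans ha)
    | cons y t' =>
      rw [List.getLast?_cons_cons] at ha
      rw [List.pairwise_cons] at hp
      rcases List.mem_cons.mp he with rfl | he'
      · have hamem : a ∈ y :: t' := List.mem_of_getLast? ha
        exact Or.inr (hp.1 a hamem)
      · exact ih hp.2 a ha e he'

-- Invariant of B's dedup pass: folding a sorted (Pairwise ≤) list onto a strictly
-- increasing accumulator whose elements are lower bounds of the remaining input yields
-- a strictly increasing list with the union of the memberships.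
lemma dedupLoop_char : ∀ (s acc : List Int), s.Pairwise (· ≤ ·) → acc.Pairwise (· < ·) →
    (∀ a ∈ acc, ∀ z ∈ s, a ≤ z) →
    ((s.foldl (fun res v =>
        if res.isEmpty || PySem.List.pyGet? res (-1) ≠ some v then res ++ [v] else res) acc).Pairwise (· < ·) ∧
     ∀ x, x ∈ s.foldl (fun res v =>
        if res.isEmpty || PySem.List.pyGet? res (-1) ≠ some v then res ++ [v] else res) acc ↔
          x ∈ acc ∨ x ∈ s) := by
  intro s
  induction s with
  | nil => intro acc _ hacc _; simpa using hacc
  | cons v s' ih =>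
    intro acc hs hacc hlb
    rw [List.pairwise_cons] at hs
    simp only [List.foldl_cons]
    by_cases hskip : acc.isEmpty = false ∧ PySem.List.pyGet? acc (-1) = some v
    · -- v equals the last element already in acc: the step keeps acc.
      have hstep : (if acc.isEmpty || PySem.List.pyGet? acc (-1) ≠ some v then acc ++ [v] else acc) = acc := by
        simp [hskip.1, hskip.2]
      rw [hstep]
      have hvmem : v ∈ acc := by
        have : acc.getLast? = some v := by
          rw [← PySem.List.pyGet?_neg_one]; exact hskip.2
        exact List.mem_of_getLast? this
      obtain ⟨h1, h2⟩ := ih acc (hs.2) hacc (fun a ha z hz => hlb a ha z (List.mem_cons_of_mem _ hz))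
      refine ⟨h1, fun x => ?_⟩
      rw [h2 x]
      simp only [List.mem_cons]
      constructor
      · tauto
      · rintro (h | rfl | h)
        · tauto
        · exact Or.inl hvmem
        · tauto
    · -- the step appends v.
      have hstep : (if acc.isEmpty || PySem.List.pyGet? acc (-1) ≠ some v then acc ++ [v] else acc) = acc ++ [v] := by
        by_cases he : acc.isEmpty
        · simp [he]
        · have : PySem.List.pyGet? acc (-1) ≠ some v := by
            intro hcontra
            exact hskip ⟨by simpa using he, hcontra⟩
          simp [this]
      rw [hstep]
      have hlt : ∀ e ∈ acc, e < v := by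
        intro e he
        rcases List.eq_nil_or_concat acc with rfl | ⟨pre, a, rfl⟩
        · simp at he
        · rw [List.concat_eq_append] at *
          have hlast : (pre ++ [a]).getLast? = some a := by simp
          have hle_a : e = a ∨ e < a :=
            le_of_getLast?_pairwise_lt _ hacc a hlast e he
          have hav : a ≤ v := hlb a (by simp) v (by simp)
          have hane : a ≠ v := by
            intro heq
            apply hskip
            constructor
            · simp
            · rw [PySem.List.pyGet?_neg_one]; simpa [heq] using hlast
          rcases hle_a with rfl | hlt'
          · exact lt_of_le_of_ne hav hane
          · exact lt_of_lt_of_le hlt' (lt_of_le_of_ne hav hane).le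
      have hacc' : (acc ++ [v]).Pairwise (· < ·) := by
        rw [List.pairwise_append]
        refine ⟨hacc, List.pairwise_singleton _ _, ?_⟩
        intro a ha b hb
        simp only [List.mem_cons, List.not_mem_nil, or_false] at hb
        subst hb; exact hlt a ha
      have hlb' : ∀ a ∈ acc ++ [v], ∀ z ∈ s', a ≤ z := by
        intro a ha z hz
        rcases List.mem_append.mp ha with h | h
        · exact hlb a h z (List.mem_cons_of_mem _ hz)
        · simp only [List.mem_cons, List.not_mem_nil, or_false] at h
          subst h; exact hs.1 z hz
      obtain ⟨h1, h2⟩ := ih (acc ++ [v]) hs.2 hacc' hlb'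
      refine ⟨h1, fun x => ?_⟩
      rw [h2 x]
      simp only [List.mem_append, List.mem_cons, List.not_mem_nil, or_false]
      tauto

lemma loopA_char (l out : List Int) (hnd : out.Nodup) :
    (l.foldl (fun (st : List Int × PySem.Set Int) item =>
      if item ≤ 0 || PySem.Set.contains st.2 item then st
      else (st.1 ++ [item], PySem.Set.add st.2 item)) (out, out)).1.Nodup ∧
    (∀ x, x ∈ (l.foldl (fun (st : List Int × PySem.Set Int) item =>
      if item ≤ 0 || PySem.Set.contains st.2 item then st
      else (st.1 ++ [item], PySem.Set.add st.2 item)) (out, out)).1 ↔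
        x ∈ out ∨ (0 < x ∧ x ∈ l)) := by
  induction l generalizing out with
  | nil => simpa using hnd
  | cons w l ih =>
    simp only [List.foldl_cons]
    by_cases hc : w ≤ 0 ∨ w ∈ out
    · have hstep : (if w ≤ 0 || PySem.Set.contains out w then ((out, out) : List Int × PySem.Set Int)
          else (out ++ [w], PySem.Set.add out w)) = (out, out) := by
        rcases hc with h | h
        · simp [h]
        · simp only [(PySem.Set.contains_iff out w).mpr h, Bool.or_true, if_true]
      rw [hstep]
      obtain ⟨hn, hmem⟩ := ih out hnd
      refine ⟨hn, fun x => ?_⟩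
      rw [hmem x]
      simp only [List.mem_cons]
      constructor
      · tauto
      · rintro (h | ⟨h1, rfl | h3⟩)
        · tauto
        · rcases hc with h0 | hm
          · omega
          · exact Or.inl hm
        · tauto
    · push_neg at hc
      have hw : (0 : Int) < w := by omega
      have hadd : PySem.Set.add out w = out ++ [w] := PySem.Set.add_of_not_mem hc.2
      have hstep : (if w ≤ 0 || PySem.Set.contains out w then ((out, out) : List Int × PySem.Set Int)
          else (out ++ [w], PySem.Set.add out w)) = (out ++ [w], out ++ [w]) := by
        have h0 : ¬ w ≤ 0 := by omega
        simp [h0, hc.2, hadd]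
      rw [hstep]
      have hnd' : (out ++ [w]).Nodup := by
        rw [List.nodup_append]
        refine ⟨hnd, List.nodup_singleton w, ?_⟩
        intro a ha b hb
        simp only [List.mem_cons, List.not_mem_nil, or_false] at hb
        subst hb
        rintro rfl; exact hc.2 ha
      obtain ⟨hn, hmem⟩ := ih (out ++ [w]) hnd'
      refine ⟨hn, fun x => ?_⟩
      rw [hmem x]
      simp only [List.mem_append, List.mem_cons, List.not_mem_nil, or_false]
      constructor
      · rintro ((h | rfl) | ⟨h1, h2⟩)
        · exact Or.inl h
        · exact Or.inr ⟨hw, Or.inl rfl⟩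
        · exact Or.inr ⟨h1, Or.inr h2⟩
      · rintro (h | ⟨h1, rfl | h2⟩)
        · exact Or.inl (Or.inl h)
        · exact Or.inl (Or.inr rfl)
        · exact Or.inr ⟨h1, h2⟩

lemma pairwise_lt_of_le_nodup (l : List Int) (h1 : l.Pairwise (· ≤ ·)) (h2 : l.Nodup) :
    l.Pairwise (· < ·) :=
  (h1.and h2).imp (fun h => lt_of_le_of_ne h.1 h.2)

lemma strict_ext : ∀ (l1 l2 : List Int), l1.Pairwise (· < ·) → l2.Pairwise (· < ·) →
    (∀ x, x ∈ l1 ↔ x ∈ l2) → l1 = l2 := by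
  intro l1
  induction l1 with
  | nil =>
    intro l2 _ _ hm
    cases l2 with
    | nil => rfl
    | cons b t2 => exact absurd ((hm b).mpr (by simp)) (by simp)
  | cons a t1 ih =>
    intro l2 h1 h2 hm
    cases l2 with
    | nil => exact absurd ((hm a).mp (by simp)) (by simp)
    | cons b t2 =>
      rw [List.pairwise_cons] at h1 h2
      have hab : a = b := by
        rcases List.mem_cons.mp ((hm a).mp (by simp)) with h | h
        · exact h
        · have hba : b < a := h2.1 a h
          rcases List.mem_cons.mp ((hm b).mpr (by simp)) with h' | h'
          · omega
          · have := h1.1 b h'; omega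
      subst hab
      congr 1
      refine ih t2 h1.2 h2.2 (fun x => ⟨fun hx => ?_, fun hx => ?_⟩)
      · have hax : a < x := h1.1 x hx
        rcases List.mem_cons.mp ((hm x).mp (List.mem_cons_of_mem _ hx)) with rfl | h'
        · omega
        · exact h'
      · have hax : a < x := h2.1 x hx
        rcases List.mem_cons.mp ((hm x).mpr (List.mem_cons_of_mem _ hx)) with rfl | h'
        · omega
        · exact h'

-- ===== VERDICT (by name: the statement is the Claim_ definition above) =====
theorem normalize_ohlc_windows_plan_py_spec : Claim_equal_normalize_ohlc_windows_plan_py := by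
  intro params _
  unfold Spec_normalize_ohlc_windows_plan_py
  unfold normalize_ohlc_windows_plan_py normalize_ohlc_windows_plan_py_alt
  cases hg : PySem.Dict.get? (PySem.Dict.mk params) "__ohlc_windows_plan__" with
  | none => rfl
  | some raw =>
    show PySem.List.sorted
        (raw.foldl (fun (st : List Int × PySem.Set Int) item =>
          if item ≤ 0 || PySem.Set.contains st.2 item then st
          else (st.1 ++ [item], PySem.Set.add st.2 item)) ([], [])).1 (fun x => x) false
      = (PySem.List.sorted
          (raw.foldl (fun acc item => if 0 < item then acc ++ [item] else acc) []) (fun x => x) false).foldl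
          (fun res v =>
            if res.isEmpty || PySem.List.pyGet? res (-1) ≠ some v then res ++ [v] else res) []
    obtain ⟨hnd, hmem⟩ := loopA_char raw [] List.nodup_nil
    have hvals : raw.foldl (fun acc item => if 0 < item then acc ++ [item] else acc) ([] : List Int)
        = raw.filter (fun x => decide (0 < x)) := by
      simpa using PySem.List.foldl_append_ite_eq_filter (fun x => 0 < x) (l := raw) (acc := [])
    rw [hvals]
    obtain ⟨hB1, hB2⟩ := dedupLoop_char
      (PySem.List.sorted (raw.filter (fun x => decide (0 < x))) (fun x => x) false) []
      (by simpa using PySem.List.sorted_pairwise (raw.filter (fun x => decide (0 < x))) (fun x => x))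
      List.Pairwise.nil (by simp)
    apply strict_ext
    · apply pairwise_lt_of_le_nodup
      · exact PySem.List.sorted_pairwise _ _
      · exact ((PySem.List.sorted_perm _ _ false).nodup_iff).mpr hnd
    · exact hB1
    · intro x
      rw [PySem.List.mem_sorted, hmem x, hB2 x]
      rw [PySem.List.mem_sorted, List.mem_filter]
      simp only [List.not_mem_nil, false_or, decide_eq_true_eq]
      tauto
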